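-- pv_equiv track=rewrite | github.com/linhdvu14/cp-sols | sols/CodeForces/1607_d3/C_Minimum_Extraction.py | solve
-- ===== SOURCE A (Python) =====
-- def solve(N, nums):
-- 	nums.sort()
-- 	res = nums[0]
-- 	d = -nums[0]
-- 	for i in range(1, N):
-- 		cur = nums[i] + d
-- 		res = max(res, cur)
-- 		d -= cur
-- 	return res
-- ===== SOURCE B (Python) =====
-- def solve(N, nums):
-- 	nums.sort()
-- 	res = nums[0]
-- 	work = [nums[i] - nums[0] for i in range(1, N)]
-- 	while work:
-- 		m = work[0]
-- 		res = max(res, m)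
-- 		work = [x - m for x in work[1:]]
-- 	return res
-- ===== Notes on version B (the rewrite author's own statement) =====
-- stated objective: alternative
-- what changed: Instead of A's single indexed pass with a running offset accumulator d, B directly simulates the extraction process: it builds the explicit list of remaining (offset-applied) values and repeatedly takes its head as the extracted minimum, rebuilding the shrinking list with the minimum subtracted each round.
import Mathlib
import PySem

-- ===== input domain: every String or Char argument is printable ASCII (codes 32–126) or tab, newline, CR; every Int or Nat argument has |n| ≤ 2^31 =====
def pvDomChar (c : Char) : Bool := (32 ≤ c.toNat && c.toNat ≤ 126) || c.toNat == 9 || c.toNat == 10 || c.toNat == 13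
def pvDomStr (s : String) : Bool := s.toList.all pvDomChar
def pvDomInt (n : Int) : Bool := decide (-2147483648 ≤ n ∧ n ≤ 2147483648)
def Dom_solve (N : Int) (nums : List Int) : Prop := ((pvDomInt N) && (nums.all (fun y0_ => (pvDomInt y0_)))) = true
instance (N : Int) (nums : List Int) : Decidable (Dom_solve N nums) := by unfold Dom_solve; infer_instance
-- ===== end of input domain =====

-- B replaces A's accumulator-passing indexed pass by an explicit simulation of the extraction process on a shrinking list (alternative decomposition); both sort nums in place identically.


-- ===== PORT A =====
def solve (N : Int) (nums : List Int) : Int :=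
  let s := PySem.List.sorted nums (fun x => x) false
  let res := PySem.List.pyGetD s 0 0
  let d := -PySem.List.pyGetD s 0 0
  let st := (PySem.List.pyRange 1 N 1).foldl
    (fun (st : Int × Int) i =>
      let cur := PySem.List.pyGetD s i 0 + st.2
      (max st.1 cur, st.2 - cur)) (res, d)
  st.1

-- ===== PORT B =====
-- the 'while work:' loop of Source B: head is the extracted minimum, rest is rebuilt with it subtracted
def solveAltLoop (res : Int) (work : List Int) : Int :=
  match work with
  | [] => res
  | m :: rest => solveAltLoop (max res m) (rest.map (fun x => x - m))
termination_by work.length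
decreasing_by simp

def solve_alt (N : Int) (nums : List Int) : Int :=
  let s := PySem.List.sorted nums (fun x => x) false
  let res := PySem.List.pyGetD s 0 0
  let work := (PySem.List.pyRange 1 N 1).map
    (fun i => PySem.List.pyGetD s i 0 - PySem.List.pyGetD s 0 0)
  solveAltLoop res work

-- ===== PRECONDITION & SPEC =====
-- exactly where A returns: nums[0] raises IndexError on [], and the loop raises IndexError when N > len(nums)
def Pre_solve (N : Int) (nums : List Int) : Prop := nums ≠ [] ∧ N ≤ (nums.length : Int)
instance (N : Int) (nums : List Int) : Decidable (Pre_solve N nums) := by unfold Pre_solve; infer_instance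
def pvWitness_solve : Int × List Int := (3, [4, 1, 7])
def Spec_solve (N : Int) (nums : List Int) (out : Int) : Prop := out = solve_alt N nums
instance (N : Int) (nums : List Int) (out : Int) : Decidable (Spec_solve N nums out) := by unfold Spec_solve; infer_instance

-- ===== CLAIM (what is proved, stated in full; the proofs are below) =====
def Claim_equal_solve : Prop := ∀ (N : Int) (nums : List Int), Dom_solve N nums → Pre_solve N nums → Spec_solve N nums (solve N nums)

-- ===== LEMMAS AND PROOFS =====

-- B's simulation loop on offset-applied values equals A's fold carrying (running max, d = -offset)
theorem solveAltLoop_eq_foldl (g : Int → Int) (L : List Int) (res c : Int) :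
    solveAltLoop res (L.map (fun i => g i - c))
    = (L.foldl (fun (st : Int × Int) i =>
        (max st.1 (g i + st.2), st.2 - (g i + st.2))) (res, -c)).1 := by
  induction L generalizing res c with
  | nil => simp [solveAltLoop]
  | cons i rest ih =>
      simp only [List.map_cons, List.foldl_cons]
      rw [solveAltLoop]
      have hmap : (rest.map (fun i' => g i' - c)).map (fun x => x - (g i - c))
          = rest.map (fun i' => g i' - g i) := by
        rw [List.map_map]; apply List.map_congr_left; intro a _; simp only [Function.comp_apply]; ring
      rw [hmap, ih]
      have h1 : g i - c = g i + -c := by ring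
      have h2 : -(g i) = -c - (g i + -c) := by ring
      rw [h1, h2]

-- ===== VERDICT (by name: the statement is the Claim_ definition above) =====
theorem solve_spec : Claim_equal_solve := by
  intro N nums _ _
  unfold Spec_solve solve solve_alt
  simp only []
  rw [solveAltLoop_eq_foldl]
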